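-- pv_equiv track=rewrite | github.com/SrijaGupta/file | NITA/lib/jnpr/toby/trafficgen/ixia/ixload/IxUtils.py | get_activity_args
-- ===== SOURCE A (Python) =====
-- def get_activity_args(value_dict):
--     '''
--         get_activity_args will return all activity args.
--     '''
--     activity_list = ["userIpMapping", "timerGranularity", "enableConstraint", "constraintValue",
--                      "objectivePercent", "secondaryConstraintValue", "userObjectiveType", "destinationIpMapping",
--                      "name", "secondaryConstraintType", "userObjectiveValue", "constraintType"]
--     ret_dict = {}
--     for key in value_dict:
--         if activity_list.count(key):
--             ret_dict[key] = value_dict[key]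
--     for key in activity_list:
--         if key in value_dict.keys():
--             value_dict.pop(key)
--     return (ret_dict, value_dict)
-- ===== SOURCE B (Python) =====
-- def get_activity_args(value_dict):
--     '''
--         get_activity_args will return all activity args.
--     '''
--     activity_set = {"userIpMapping", "timerGranularity", "enableConstraint", "constraintValue",
--                     "objectivePercent", "secondaryConstraintValue", "userObjectiveType", "destinationIpMapping",
--                     "name", "secondaryConstraintType", "userObjectiveValue", "constraintType"}
--     ret_dict = {}
--     for key, value in list(value_dict.items()):
--         if key in activity_set:
--             ret_dict[key] = value
--             value_dict.pop(key)
--     return (ret_dict, value_dict)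
-- ===== Notes on version B (the rewrite author's own statement) =====
-- stated objective: simpler
-- what changed: A's two passes (build ret_dict by scanning the dict with list.count, then remove whitelisted keys by scanning the whitelist) are fused into one pass over the dict items that moves each whitelisted entry into ret_dict via pop, testing membership in a set.
import Mathlib
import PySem

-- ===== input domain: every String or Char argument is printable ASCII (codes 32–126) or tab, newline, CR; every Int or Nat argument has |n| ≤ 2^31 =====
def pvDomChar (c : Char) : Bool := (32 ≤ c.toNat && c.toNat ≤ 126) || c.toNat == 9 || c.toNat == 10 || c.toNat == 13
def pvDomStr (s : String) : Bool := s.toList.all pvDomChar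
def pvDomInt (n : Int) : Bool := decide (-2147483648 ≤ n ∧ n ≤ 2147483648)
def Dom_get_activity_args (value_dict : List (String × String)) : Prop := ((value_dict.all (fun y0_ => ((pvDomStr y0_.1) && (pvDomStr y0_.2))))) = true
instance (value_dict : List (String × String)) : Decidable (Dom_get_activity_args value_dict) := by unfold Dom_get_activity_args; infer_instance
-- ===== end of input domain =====

-- B fuses A's two passes (collect then remove) into one pass over the dict items; equal return
-- value proved on dicts (association lists with distinct keys); B mutates value_dict in place
-- exactly as A does (return value is what is proved here).

-- the fixed whitelist both versions use (A as a list, B as a set literal of the same strings)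
def pvActivityList : List String :=
  ["userIpMapping", "timerGranularity", "enableConstraint", "constraintValue",
   "objectivePercent", "secondaryConstraintValue", "userObjectiveType", "destinationIpMapping",
   "name", "secondaryConstraintType", "userObjectiveValue", "constraintType"]

-- Python truthiness of an int: nonzero is true
def pvTruthy (n : Nat) : Bool := n != 0

-- ===== PORT A =====
def get_activity_args (value_dict : List (String × String)) : (List (String × String)) × (List (String × String)) :=
  let activity_list := pvActivityList
  let d : PySem.Dict String String := ⟨value_dict⟩
  -- for key in value_dict: if activity_list.count(key): ret_dict[key] = value_dict[key]
  -- (value_dict[key] cannot raise KeyError: key was drawn from value_dict's keys)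
  let ret_dict := d.keys.foldl
    (fun r key => if pvTruthy (PySem.List.count activity_list key) then r.insert key (d.getD key "") else r)
    PySem.Dict.empty
  -- for key in activity_list: if key in value_dict.keys(): value_dict.pop(key)
  let d2 := activity_list.foldl (fun e key => if e.contains key then e.erase key else e) d
  (ret_dict.items, d2.items)

-- ===== PORT B =====
def get_activity_args_alt (value_dict : List (String × String)) : (List (String × String)) × (List (String × String)) :=
  let activity_set : PySem.Set String := PySem.Set.ofList pvActivityList
  -- for key, value in list(value_dict.items()): if key in activity_set:
  --     ret_dict[key] = value; value_dict.pop(key)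
  let st := value_dict.foldl
    (fun (st : PySem.Dict String String × PySem.Dict String String) kv =>
      if activity_set.contains kv.1 then (st.1.insert kv.1 kv.2, st.2.erase kv.1) else st)
    (PySem.Dict.empty, ⟨value_dict⟩)
  (st.1.items, st.2.items)

-- ===== PRECONDITION & SPEC =====
-- Pre_ excludes association lists with duplicate keys: those do not represent any Python dict
-- input (a dict literal deduplicates), so A is never called on them.
def Pre_get_activity_args (value_dict : List (String × String)) : Prop :=
  (value_dict.map Prod.fst).Nodup
instance (value_dict : List (String × String)) : Decidable (Pre_get_activity_args value_dict) := by
  unfold Pre_get_activity_args; infer_instance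
def pvWitness_get_activity_args : (List (String × String)) := [("name", "http"), ("foo", "bar")]

def Spec_get_activity_args (value_dict : List (String × String)) (out : (List (String × String)) × (List (String × String))) : Prop := out = get_activity_args_alt value_dict
instance (value_dict : List (String × String)) (out : (List (String × String)) × (List (String × String))) : Decidable (Spec_get_activity_args value_dict out) := by unfold Spec_get_activity_args; infer_instance

-- ===== CLAIM (what is proved, stated in full; the proofs are below) =====
def Claim_equal_get_activity_args : Prop := ∀ (value_dict : List (String × String)), Dom_get_activity_args value_dict → Pre_get_activity_args value_dict → Spec_get_activity_args value_dict (get_activity_args value_dict)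

-- ===== LEMMAS AND PROOFS =====

-- the remove step of A ('pop the key if present') filters out all entries with that key
theorem pvEraseStep (e : PySem.Dict String String) (k : String) :
    (if e.contains k then e.erase k else e).items = e.items.filter (fun p => !(p.1 == k)) := by
  by_cases h : e.contains k = true
  · simp [h, PySem.Dict.erase]
  · rw [if_neg h, Eq.comm, List.filter_eq_self]
    intro a ha
    cases a with
    | mk x y =>
      simp only [Bool.not_eq_true', beq_eq_false_iff_ne]
      intro he
      simp [PySem.Dict.contains] at h
      exact h y (he ▸ ha)

-- A's whole removal loop = one filter by non-membership in the whitelist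
theorem pvRemLoop (ws : List String) : ∀ (e : PySem.Dict String String),
    (ws.foldl (fun e k => if e.contains k then e.erase k else e) e).items
      = e.items.filter (fun p => !(ws.contains p.1)) := by
  induction ws with
  | nil => intro e; simp
  | cons k ws ih =>
      intro e
      rw [List.foldl_cons, ih, pvEraseStep, List.filter_filter]
      apply List.filter_congr
      intro p _
      by_cases hpk : p.1 = k
      · simp [hpk]
      · simp [hpk]

-- B's second component ignores the first; it is the same conditional-erase loop over the items
theorem pvAltSnd (c : String → Bool) :
    ∀ (l : List (String × String)) (r e : PySem.Dict String String),
    (l.foldl (fun (st : PySem.Dict String String × PySem.Dict String String) kv =>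
        if c kv.1 then (st.1.insert kv.1 kv.2, st.2.erase kv.1) else st) (r, e)).2.items
      = e.items.filter (fun p => !(l.any (fun q => c q.1 && q.1 == p.1))) := by
  intro l
  induction l with
  | nil => intro r e; simp
  | cons kv l ih =>
      intro r e
      by_cases h : c kv.1 = true
      · rw [List.foldl_cons, if_pos h, ih, PySem.Dict.erase]
        simp only [List.filter_filter]
        apply List.filter_congr
        intro p _
        by_cases hpk : p.1 = kv.1
        · simp [hpk, h]
        · rw [show (p.1 == kv.1) = false from beq_eq_false_iff_ne.mpr hpk]
          simp [List.any_cons,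
                show (kv.1 == p.1) = false from beq_eq_false_iff_ne.mpr (fun he => hpk he.symm)]
      · rw [List.foldl_cons, if_neg h, ih]
        apply List.filter_congr
        intro p _
        simp [List.any_cons, h]

-- B's first component ignores the second
theorem pvAltFst (c : String → Bool) :
    ∀ (l : List (String × String)) (r e : PySem.Dict String String),
    (l.foldl (fun (st : PySem.Dict String String × PySem.Dict String String) kv =>
        if c kv.1 then (st.1.insert kv.1 kv.2, st.2.erase kv.1) else st) (r, e)).1
      = l.foldl (fun r kv => if c kv.1 then r.insert kv.1 kv.2 else r) r := by
  intro l
  induction l with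
  | nil => intro r e; rfl
  | cons kv l ih =>
      intro r e
      by_cases h : c kv.1 = true
      · rw [List.foldl_cons, if_pos h, ih, List.foldl_cons, if_pos h]
      · rw [List.foldl_cons, if_neg h, ih, List.foldl_cons, if_neg h]

-- a conditional-insert loop over items with pairwise-distinct fresh keys appends the kept pairs
theorem pvInsLoop (c : String → Bool) :
    ∀ (l : List (String × String)) (r : PySem.Dict String String),
    (l.map Prod.fst).Nodup → (∀ p ∈ l, r.contains p.1 = false) →
    (l.foldl (fun r kv => if c kv.1 then r.insert kv.1 kv.2 else r) r).items
      = r.items ++ l.filter (fun p => c p.1) := by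
  intro l
  induction l with
  | nil => intro r _ _; simp
  | cons kv l ih =>
      intro r hnd hfr
      have hk : r.contains kv.1 = false := hfr kv (by simp)
      rw [List.map_cons] at hnd
      have hnd2 := List.nodup_cons.mp hnd
      have hnd' : (l.map Prod.fst).Nodup := hnd2.2
      by_cases h : c kv.1 = true
      · rw [List.foldl_cons, if_pos h,
            ih (r.insert kv.1 kv.2) hnd'
              (by
                intro p hp
                rw [PySem.Dict.contains_insert]
                have h1 : p.1 ≠ kv.1 := fun he =>
                  hnd2.1 (he ▸ List.mem_map_of_mem (f := Prod.fst) hp)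
                simp [h1, hfr p (by simp [hp])]),
            PySem.Dict.items_insert_of_not_contains _ _ hk]
        simp [h]
      · rw [List.foldl_cons, if_neg h, ih r hnd' (fun p hp => hfr p (by simp [hp]))]
        simp [h]

-- A's collect loop runs over the keys and looks each value up again; with g k = that lookup
-- replaced by the paired value it is the items loop of pvInsLoop
theorem pvKeysToItems (c : String → Bool) (g : String → String) :
    ∀ (l : List (String × String)) (r : PySem.Dict String String),
    (∀ p ∈ l, g p.1 = p.2) →
    ((l.map Prod.fst).foldl (fun r k => if c k then r.insert k (g k) else r) r)
      = l.foldl (fun r kv => if c kv.1 then r.insert kv.1 kv.2 else r) r := by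
  intro l
  induction l with
  | nil => intro r _; rfl
  | cons kv l ih =>
      intro r hg
      rw [List.map_cons, List.foldl_cons, List.foldl_cons, hg kv (by simp)]
      exact ih _ (fun p hp => hg p (by simp [hp]))

-- the three membership tests agree: activity_list.count(k) truthy ⟺ k in the set ⟺ k ∈ list
theorem pvCondEq (k : String) :
    pvTruthy (PySem.List.count pvActivityList k)
      = (PySem.Set.ofList pvActivityList).contains k := by
  have h : PySem.Set.ofList pvActivityList = pvActivityList := by decide
  rw [h]
  simp only [pvTruthy, PySem.List.count, PySem.Set.contains, bne, List.contains_eq_mem]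
  by_cases hm : k ∈ pvActivityList
  · rw [show (List.count k pvActivityList == 0) = false from
        beq_eq_false_iff_ne.mpr (by simp [List.count_eq_zero, hm])]
    simp [hm]
  · rw [show (List.count k pvActivityList == 0) = true from
        beq_iff_eq.mpr (List.count_eq_zero.mpr hm)]
    simp [hm]

-- ===== VERDICT (by name: the statement is the Claim_ definition above) =====
theorem get_activity_args_spec : Claim_equal_get_activity_args := by
  intro vd _ hpre
  have hnd : (vd.map Prod.fst).Nodup := hpre
  have hg : ∀ p ∈ vd, (⟨vd⟩ : PySem.Dict String String).getD p.1 "" = p.2 := by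
    intro p hp
    exact PySem.Dict.getD_of_mem_items (d := ⟨vd⟩) (by simpa using hp)
      (by simpa [PySem.Dict.keys] using hnd) ""
  show get_activity_args vd = get_activity_args_alt vd
  unfold get_activity_args get_activity_args_alt
  rw [Prod.mk.injEq]
  constructor
  · -- first components: both collect exactly the whitelisted entries, in dict order
    rw [pvAltFst, show (⟨vd⟩ : PySem.Dict String String).keys = vd.map Prod.fst from rfl,
        pvKeysToItems _ _ vd _ hg,
        pvInsLoop (fun k => (PySem.Set.ofList pvActivityList).contains k) vd _ hnd
          (fun p _ => PySem.Dict.contains_empty p.1),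
        pvInsLoop (fun k => pvTruthy (PySem.List.count pvActivityList k)) vd _ hnd
          (fun p _ => PySem.Dict.contains_empty p.1)]
    congr 1
    apply List.filter_congr
    intro p _
    exact pvCondEq p.1
  · -- second components: both leave exactly the non-whitelisted entries, in dict order
    rw [pvRemLoop, pvAltSnd]
    apply List.filter_congr
    intro p hp
    congr 1
    by_cases h : (PySem.Set.ofList pvActivityList).contains p.1 = true
    · have hc : pvActivityList.contains p.1 = true := by
        have he : PySem.Set.ofList pvActivityList = pvActivityList := by decide
        rwa [he] at h
      rw [hc, Eq.comm, List.any_eq_true]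
      exact ⟨p, hp, by simp [by simpa [List.contains_eq_mem] using hc]⟩
    · have h' : (PySem.Set.ofList pvActivityList).contains p.1 = false := by
        simpa using h
      have hc : pvActivityList.contains p.1 = false := by
        have he : PySem.Set.ofList pvActivityList = pvActivityList := by decide
        rwa [he] at h'
      rw [hc, Eq.comm, List.any_eq_false]
      intro q hq
      by_cases hqp : q.1 = p.1
      · simp [hqp, by simpa [List.contains_eq_mem] using hc]
      · simp [hqp]
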